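-- pv_equiv track=rewrite | github.com/YuneeeM/Python_Algorithm | 프로그래머스/feb/0211-1.py | solution
-- ===== SOURCE A (Python) =====
-- def solution(a, d, included):
--     ai = a
--     answer = 0
--     for i in included:
--         if i:
--             answer += ai
--         ai = ai + d
--
--     return answer
-- ===== SOURCE B (Python) =====
-- def solution(a, d, included):
--     idx = [i for i, x in enumerate(included) if x]
--     return a * len(idx) + d * sum(idx)
-- ===== Notes on version B (the rewrite author's own statement) =====
-- stated objective: alternative
-- what changed: Replaces the running-term accumulation with collecting the truthy indices once and applying the arithmetic-series formula a*len(idx) + d*sum(idx).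
import Mathlib
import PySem

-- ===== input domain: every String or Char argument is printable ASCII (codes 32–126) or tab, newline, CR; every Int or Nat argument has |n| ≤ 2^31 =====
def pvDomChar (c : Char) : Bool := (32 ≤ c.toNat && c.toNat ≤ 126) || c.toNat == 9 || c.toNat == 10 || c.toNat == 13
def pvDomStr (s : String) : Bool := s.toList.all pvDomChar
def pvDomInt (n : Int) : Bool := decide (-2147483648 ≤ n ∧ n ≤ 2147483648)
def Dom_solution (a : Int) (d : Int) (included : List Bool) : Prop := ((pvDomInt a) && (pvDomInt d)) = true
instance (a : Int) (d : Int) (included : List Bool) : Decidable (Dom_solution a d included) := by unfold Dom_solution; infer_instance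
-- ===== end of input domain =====

-- B replaces the running-term accumulation with collecting the truthy indices and one
-- arithmetic-series formula a*len(idx) + d*sum(idx) (alternative decomposition, same cost).

-- ===== PORT A =====
def solution (a : Int) (d : Int) (included : List Bool) : Int :=
  (included.foldl (fun (st : Int × Int) i => (st.1 + d, if i then st.2 + st.1 else st.2)) (a, 0)).2

-- ===== PORT B =====
def solution_alt (a : Int) (d : Int) (included : List Bool) : Int :=
  let idx := ((PySem.List.enumerate included 0).filter (fun p => p.2)).map (fun p => p.1)
  a * (idx.length : Int) + d * idx.sum

-- ===== PRECONDITION & SPEC =====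
def Spec_solution (a : Int) (d : Int) (included : List Bool) (out : Int) : Prop := out = solution_alt a d included
instance (a : Int) (d : Int) (included : List Bool) (out : Int) : Decidable (Spec_solution a d included out) := by unfold Spec_solution; infer_instance

-- ===== CLAIM (what is proved, stated in full; the proofs are below) =====
def Claim_equal_solution : Prop := ∀ (a : Int) (d : Int) (included : List Bool), Dom_solution a d included → Spec_solution a d included (solution a d included)

-- ===== LEMMAS AND PROOFS =====

/-- number of truthy entries -/
def cnt : List Bool → Int
  | [] => 0
  | b :: t => (if b then 1 else 0) + cnt t

/-- sum of 0-based indices of truthy entries -/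
def sidx : List Bool → Int
  | [] => 0
  | b :: t => cnt t + sidx t

theorem foldA (d : Int) : ∀ (l : List Bool) (ai ans : Int),
    (l.foldl (fun (st : Int × Int) i => (st.1 + d, if i then st.2 + st.1 else st.2)) (ai, ans)).2
      = ans + ai * cnt l + d * sidx l
  | [], ai, ans => by simp [cnt, sidx]
  | b :: t, ai, ans => by
    simp only [List.foldl, foldA d t, cnt, sidx]
    by_cases hb : b <;> simp [hb] <;> ring

theorem enumLenSum : ∀ (l : List Bool) (s : Int),
    ((((PySem.List.enumerate l s).filter (fun p => p.2)).map (fun p => p.1)).length : Int) = cnt l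
    ∧ (((PySem.List.enumerate l s).filter (fun p => p.2)).map (fun p => p.1)).sum
        = s * cnt l + sidx l
  | [], s => by simp [PySem.List.enumerate_nil, cnt, sidx]
  | b :: t, s => by
    obtain ⟨ih1, ih2⟩ := enumLenSum t (s + 1)
    by_cases hb : b
    · rw [PySem.List.enumerate_cons, List.filter_cons_of_pos (by simpa using hb),
        List.map_cons, List.length_cons, List.sum_cons]
      refine ⟨?_, ?_⟩
      · push_cast; rw [ih1]; simp [cnt, hb]; ring
      · rw [ih2]; simp only [cnt, sidx, hb, if_pos]; ring
    · rw [PySem.List.enumerate_cons, List.filter_cons_of_neg (by simpa using hb)]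
      refine ⟨?_, ?_⟩
      · rw [ih1]; simp [cnt, hb]
      · rw [ih2]; simp only [cnt, sidx, hb, if_neg, Bool.false_eq_true, not_false_iff]; ring

-- ===== VERDICT (by name: the statement is the Claim_ definition above) =====
theorem solution_spec : Claim_equal_solution := by
  intro a d included _
  show solution a d included = solution_alt a d included
  obtain ⟨h1, h2⟩ := enumLenSum included 0
  simp only [solution, solution_alt, foldA, h1, h2]
  ring
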